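-- pv_equiv track=rewrite | github.com/Hanrong-li/lhr_ | data_clean/functions.py | fixed_space
-- ===== SOURCE A (Python) =====
-- def fixed_space(sentence: str)->str:
--     n = len(sentence)
--     new_sentence = []
--     i = 0
--     while i < n:
--         word =  sentence[i]
--         if word != ' ':
--             new_sentence.append(word)
--         elif i + 1 < n and sentence[i + 1] == ' ':
--             new_sentence.append(word)
--             i += 1
--         i += 1
--
--     return ''.join(new_sentence)
-- ===== SOURCE B (Python) =====
-- from itertools import groupby
--
--
-- def fixed_space(sentence: str) -> str:
--     out = []
--     for is_space, run in groupby(sentence, key=lambda c: c == ' '):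
--         chunk = ''.join(run)
--         out.append(' ' * (len(chunk) // 2) if is_space else chunk)
--     return ''.join(out)
-- ===== Notes on version B (the rewrite author's own statement) =====
-- stated objective: simpler
-- what changed: Replaced the index-tracking while loop with pair skipping by an itertools.groupby pass over maximal runs: a run of k spaces contributes k//2 spaces, non-space runs are kept verbatim.
import Mathlib
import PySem

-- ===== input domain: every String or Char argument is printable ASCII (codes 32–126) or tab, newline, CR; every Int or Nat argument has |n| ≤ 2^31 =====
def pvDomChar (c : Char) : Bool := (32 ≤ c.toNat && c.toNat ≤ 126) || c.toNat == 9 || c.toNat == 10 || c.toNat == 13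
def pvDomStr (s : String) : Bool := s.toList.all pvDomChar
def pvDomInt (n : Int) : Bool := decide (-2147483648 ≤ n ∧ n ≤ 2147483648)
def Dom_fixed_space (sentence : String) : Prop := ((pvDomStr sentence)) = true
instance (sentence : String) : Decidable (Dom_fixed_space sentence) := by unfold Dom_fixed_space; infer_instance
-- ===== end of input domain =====

-- B replaces A's index-pair while loop with a groupby over maximal runs (k spaces -> k/2 spaces); objective: simpler.

-- ===== PORT A =====
-- A's while loop: looks at sentence[i] and, for a space, at sentence[i+1]; ported as
-- structural recursion over the character list carrying the same lookahead decisions.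
def fsLoopA : List Char → List Char
  | [] => []
  | c :: rest =>
    if c ≠ ' ' then c :: fsLoopA rest
    else
      match rest with
      | d :: rest' => if d = ' ' then c :: fsLoopA rest' else fsLoopA (d :: rest')
      | [] => []

def fixed_space (sentence : String) : String :=
  String.mk (fsLoopA sentence.toList)

-- ===== PORT B =====
-- itertools.groupby(sentence, key=c==' '): maximal runs of same key, front to back.
def fsGroup : List Char → List (List Char)
  | [] => []
  | c :: cs =>
    match fsGroup cs with
    | [] => [[c]]
    | [] :: gs => [c] :: [] :: gs
    | (d :: ds) :: gs =>
      if (c == ' ') = (d == ' ') then (c :: d :: ds) :: gs else [c] :: (d :: ds) :: gs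

-- ' ' * (len(chunk)//2) for a space run, the chunk itself otherwise
def fsPiece (g : List Char) : List Char :=
  if g.head? = some ' ' then List.replicate (g.length / 2) ' ' else g

def fixed_space_alt (sentence : String) : String :=
  String.mk (((fsGroup sentence.toList).map fsPiece).flatten)

-- ===== PRECONDITION & SPEC =====
def Spec_fixed_space (sentence : String) (out : String) : Prop := out = fixed_space_alt sentence
instance (sentence : String) (out : String) : Decidable (Spec_fixed_space sentence out) := by unfold Spec_fixed_space; infer_instance

-- ===== CLAIM (what is proved, stated in full; the proofs are below) =====
def Claim_equal_fixed_space : Prop := ∀ (sentence : String), Dom_fixed_space sentence → Spec_fixed_space sentence (fixed_space sentence)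

-- ===== LEMMAS AND PROOFS =====

theorem fsLoopA_cons_nonspace (c : Char) (cs : List Char) (hc : c ≠ ' ') :
    fsLoopA (c :: cs) = c :: fsLoopA cs := by
  rw [fsLoopA.eq_def]
  exact if_pos hc

def fsProcB (l : List Char) : List Char := ((fsGroup l).map fsPiece).flatten

-- first group of fsGroup (c :: cs) starts with c
theorem fsGroup_cons_shape (c : Char) (cs : List Char) :
    ∃ ds gs, fsGroup (c :: cs) = (c :: ds) :: gs := by
  show ∃ ds gs, (match fsGroup cs with
    | [] => [[c]]
    | [] :: gs => [c] :: [] :: gs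
    | (d :: ds) :: gs =>
      if (c == ' ') = (d == ' ') then (c :: d :: ds) :: gs else [c] :: (d :: ds) :: gs) = (c :: ds) :: gs
  rcases fsGroup cs with _ | ⟨g, gs⟩
  · exact ⟨[], [], rfl⟩
  · rcases g with _ | ⟨d, ds⟩
    · exact ⟨[], [] :: gs, rfl⟩
    · by_cases h : (c == ' ') = (d == ' ')
      · exact ⟨d :: ds, gs, by simp [h]⟩
      · exact ⟨[], (d :: ds) :: gs, by simp [h]⟩

-- a non-space head passes through fsProcB unchanged
theorem fsProcB_cons_nonspace (c : Char) (cs : List Char) (hc : c ≠ ' ') :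
    fsProcB (c :: cs) = c :: fsProcB cs := by
  unfold fsProcB
  show (((match fsGroup cs with
    | [] => [[c]]
    | [] :: gs => [c] :: [] :: gs
    | (d :: ds) :: gs =>
      if (c == ' ') = (d == ' ') then (c :: d :: ds) :: gs else [c] :: (d :: ds) :: gs).map fsPiece).flatten) = _
  rcases h : fsGroup cs with _ | ⟨g, gs⟩
  · simp [fsPiece, hc]
  · rcases g with _ | ⟨d, ds⟩
    · simp [fsPiece, hc]
    · by_cases hk : (c == ' ') = (d == ' ')
      · have hd : d ≠ ' ' := by
          intro hd; apply hc; subst hd; simpa using hk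
        simp [hk, fsPiece, hc, hd]
      · simp [hk, fsPiece, hc]

-- fsGroup peels off a maximal leading run of spaces as one group
theorem fsGroup_replicate_space (k : ℕ) (rest : List Char)
    (hr : rest.head? ≠ some ' ') (hk : 1 ≤ k) :
    fsGroup (List.replicate k ' ' ++ rest) = List.replicate k ' ' :: fsGroup rest := by
  induction k with
  | zero => omega
  | succ k ih =>
    rcases Nat.eq_zero_or_pos k with hk0 | hk1
    · subst hk0
      show (match fsGroup rest with
        | [] => [[' ']]
        | [] :: gs => [' '] :: [] :: gs
        | (d :: ds) :: gs =>
          if ((' ' : Char) == ' ') = (d == ' ') then (' ' :: d :: ds) :: gs else [' '] :: (d :: ds) :: gs)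
        = [' '] :: fsGroup rest
      rcases rest with _ | ⟨r, rs⟩
      · rfl
      · obtain ⟨ds, gs, hg⟩ := fsGroup_cons_shape r rs
        have hrne : r ≠ ' ' := by intro h; exact hr (by simp [h])
        rw [hg]
        simp [hrne]
    · have ih' := ih hk1
      show (match fsGroup (List.replicate k ' ' ++ rest) with
        | [] => [[' ']]
        | [] :: gs => [' '] :: [] :: gs
        | (d :: ds) :: gs =>
          if ((' ' : Char) == ' ') = (d == ' ') then (' ' :: d :: ds) :: gs else [' '] :: (d :: ds) :: gs)
        = List.replicate (k + 1) ' ' :: fsGroup rest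
      rw [ih']
      rcases k with _ | k
      · omega
      · simp [List.replicate_succ]

-- A's loop turns a maximal run of k spaces into k/2 spaces
theorem fsLoopA_replicate_space (k : ℕ) (rest : List Char) (hr : rest.head? ≠ some ' ') :
    fsLoopA (List.replicate k ' ' ++ rest) = List.replicate (k / 2) ' ' ++ fsLoopA rest := by
  induction k using Nat.strong_induction_on with
  | _ k ih =>
    match k with
    | 0 => simp
    | 1 =>
      rcases rest with _ | ⟨r, rs⟩
      · simp [fsLoopA]
      · have hrne : r ≠ ' ' := by intro h; exact hr (by simp [h])
        simp [fsLoopA, hrne]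
    | (k + 2) =>
      have ih' := ih k (by omega)
      have h2 : (k + 2) / 2 = k / 2 + 1 := by omega
      simp only [List.replicate_succ, List.cons_append, fsLoopA, h2]
      simp [ih']

theorem fsLoopA_eq_fsProcB (l : List Char) : fsLoopA l = fsProcB l := by
  suffices H : ∀ n (l : List Char), l.length ≤ n → fsLoopA l = fsProcB l from
    H l.length l le_rfl
  intro n
  induction n with
  | zero =>
    intro l hl
    have : l = [] := List.eq_nil_of_length_eq_zero (Nat.le_zero.mp hl)
    subst this; rfl
  | succ n ih =>
    intro l hl
    rcases l with _ | ⟨c, cs⟩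
    · rfl
    · by_cases hc : c = ' '
      · subst hc
        set p : Char → Bool := fun x => x == ' ' with hp
        set k := ((' ' :: cs).takeWhile p).length with hkdef
        set rest := (' ' :: cs).dropWhile p with hrest
        have htake : (' ' :: cs).takeWhile p = List.replicate k ' ' := by
          rw [List.eq_replicate_iff]
          refine ⟨rfl, fun b hb => ?_⟩
          have := List.mem_takeWhile_imp hb
          simpa [hp] using this
        have hsplit : ' ' :: cs = List.replicate k ' ' ++ rest := by
          rw [← htake, hrest, List.takeWhile_append_dropWhile]
        have hk : 1 ≤ k := by
          have : (' ' :: cs).takeWhile p = ' ' :: cs.takeWhile p := by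
            simp [hp]
          rw [hkdef, this]; simp
        have hr : rest.head? ≠ some ' ' := by
          have h1 := List.head?_dropWhile_not (p := p) (l := ' ' :: cs)
          intro h; rw [← hrest] at h1; rw [h] at h1; simp [hp] at h1
        have hlen : rest.length ≤ n := by
          have h2 := congrArg List.length hsplit
          simp at h2
          have hl' : cs.length + 1 ≤ n + 1 := by simpa using hl
          omega
        rw [hsplit, fsLoopA_replicate_space k rest hr]
        unfold fsProcB
        rw [fsGroup_replicate_space k rest hr hk]
        have hpiece : fsPiece (List.replicate k ' ') = List.replicate (k / 2) ' ' := by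
          have hh : (List.replicate k ' ' : List Char).head? = some ' ' := by
            rcases k with _ | k
            · omega
            · rw [List.replicate_succ]; rfl
          unfold fsPiece
          rw [if_pos hh, List.length_replicate]
        simp only [List.map_cons, List.flatten_cons, hpiece]
        rw [ih rest hlen]
        rfl
      · rw [fsLoopA_cons_nonspace c cs hc, ih cs (by simp at hl; omega),
          fsProcB_cons_nonspace c cs hc]

-- ===== VERDICT (by name: the statement is the Claim_ definition above) =====
theorem fixed_space_spec : Claim_equal_fixed_space := by
  intro s _
  show _ = _
  unfold fixed_space fixed_space_alt
  rw [fsLoopA_eq_fsProcB]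
  rfl
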